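-- pv_equiv track=rewrite | github.com/shhuan1989/algorithms | codeforces/1333C.py | solve
-- ===== SOURCE A (Python) =====
-- def solve(N, A):
--     presum = [0]
--     for v in A:
--         presum.append(presum[-1] + v)
--
--     start, end = 0, 0
--     ans = 0
--     s = {0}
--     while start < N:
--         while end < N and presum[end+1] not in s:
--             end += 1
--             s.add(presum[end])
--         ans += end - start
--         s.remove(presum[start])
--         start += 1
--
--     return ans
-- ===== SOURCE B (Python) =====
-- def solve(N, A):
--     presum = [0]
--     for v in A:
--         presum.append(presum[-1] + v)
--     pos = {0: 0}
--     left = 0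
--     ans = 0
--     for r in range(1, N + 1):
--         v = presum[r]
--         if v in pos and pos[v] >= left:
--             left = pos[v] + 1
--         ans += r - left
--         pos[v] = r
--     return ans
-- ===== Notes on version B (the rewrite author's own statement) =====
-- stated objective: alternative
-- what changed: A slides a window with a set of window prefix sums, a nested while advancing end and per-step element removal; B makes one forward pass over r maintaining a value-to-last-index dict and a jumping left pointer, with no removals and no inner loop.
import Mathlib
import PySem

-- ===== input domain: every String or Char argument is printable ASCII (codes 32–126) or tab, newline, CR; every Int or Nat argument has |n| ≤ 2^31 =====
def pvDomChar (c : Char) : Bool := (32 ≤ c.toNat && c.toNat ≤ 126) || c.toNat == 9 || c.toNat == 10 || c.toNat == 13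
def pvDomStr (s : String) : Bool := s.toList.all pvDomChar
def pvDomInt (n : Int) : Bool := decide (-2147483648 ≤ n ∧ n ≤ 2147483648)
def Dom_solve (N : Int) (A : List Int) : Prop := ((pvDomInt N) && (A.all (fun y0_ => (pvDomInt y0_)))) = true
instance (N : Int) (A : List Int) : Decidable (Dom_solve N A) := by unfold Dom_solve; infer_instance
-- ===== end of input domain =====

-- B replaces A's sliding-window set (nested while, per-step removal) with a single pass
-- keeping a value→last-index dict and a jumping left pointer: an alternative of the same cost.

-- ===== PORT A =====
-- inner 'while end < N and presum[end+1] not in s: end += 1; s.add(presum[end])'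
def solveInner (N : Int) (P : List Int) (e : Int) (s : PySem.Set Int) : Int × PySem.Set Int :=
  if h : e < N ∧ ¬ (PySem.Set.contains s (PySem.List.pyGetD P (e + 1) 0)) then
    solveInner N P (e + 1) (PySem.Set.add s (PySem.List.pyGetD P (e + 1) 0))
  else (e, s)
termination_by (N - e).toNat
decreasing_by omega

-- outer 'while start < N'.  's.remove(presum[start])': the element is always present here
-- (the window [start, end] is nonempty after the inner loop), so KeyError is impossible and
-- remove is exact as discard.
def solveOuter (N : Int) (P : List Int) (start e ans : Int) (s : PySem.Set Int) : Int :=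
  if h : start < N then
    let p := solveInner N P e s
    solveOuter N P (start + 1) p.1 (ans + (p.1 - start))
      (PySem.Set.discard p.2 (PySem.List.pyGetD P start 0))
  else ans
termination_by (N - start).toNat
decreasing_by omega

def solve (N : Int) (A : List Int) : Int :=
  let presum := A.foldl (fun ps v => ps ++ [PySem.List.pyGetD ps (-1) 0 + v]) [0]
  solveOuter N presum 0 0 0 (PySem.Set.ofList [0])

-- ===== PORT B =====
-- one step of B's loop body for index r
def altStep (P : List Int) (st : PySem.Dict Int Int × Int × Int) (r : Int) :
    PySem.Dict Int Int × Int × Int :=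
  let v := PySem.List.pyGetD P r 0
  let left :=
    match st.1.get? v with
    | some j => if j ≥ st.2.1 then j + 1 else st.2.1
    | none => st.2.1
  (st.1.insert v r, left, st.2.2 + (r - left))

def solve_alt (N : Int) (A : List Int) : Int :=
  let presum := A.foldl (fun ps v => ps ++ [PySem.List.pyGetD ps (-1) 0 + v]) [0]
  let st := (PySem.List.pyRange 1 (N + 1) 1).foldl (altStep presum)
    ((PySem.Dict.empty.insert 0 0 : PySem.Dict Int Int), 0, 0)
  st.2.2

-- ===== PRECONDITION & SPEC =====
-- Pre_ excludes exactly the inputs where Python A raises IndexError (presum[end+1] with N > len(A)).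
def Pre_solve (N : Int) (A : List Int) : Prop := N ≤ A.length
instance (N : Int) (A : List Int) : Decidable (Pre_solve N A) := by unfold Pre_solve; infer_instance
def pvWitness_solve : Int × List Int := (4, [1, 2, -2, 3])

def Spec_solve (N : Int) (A : List Int) (out : Int) : Prop := out = solve_alt N A
instance (N : Int) (A : List Int) (out : Int) : Decidable (Spec_solve N A out) := by unfold Spec_solve; infer_instance

-- ===== CLAIM (what is proved, stated in full; the proofs are below) =====
def Claim_equal_solve : Prop := ∀ (N : Int) (A : List Int), Dom_solve N A → Pre_solve N A → Spec_solve N A (solve N A)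

-- ===== LEMMAS AND PROOFS =====

-- g i = presum[i] (with default 0 beyond the list; indices used are always ≥ 0)
def gP (P : List Int) (i : Int) : Int := PySem.List.pyGetD P i 0

-- "presum[l..r] all distinct", as a Prop and as a Bool
def DD (P : List Int) (l r : Int) : Prop := ∀ i j : Int, l ≤ i → i < j → j ≤ r → gP P i ≠ gP P j

def Db (P : List Int) (l r : Int) : Bool :=
  (PySem.List.pyRange l (r + 1) 1).all fun i =>
    (PySem.List.pyRange (i + 1) (r + 1) 1).all fun j => gP P i != gP P j

lemma Db_iff (P : List Int) (l r : Int) : Db P l r = true ↔ DD P l r := by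
  unfold Db DD
  simp [List.all_eq_true, PySem.List.mem_pyRange_one]
  constructor
  · intro h i j hi hij hjr
    exact h i hi (by omega) j hij (by omega)
  · intro h i hi _ j hij hj
    exact h i j hi hij (by omega)

lemma DD_mono (P : List Int) {l r l' r' : Int} (h : DD P l r) (hl : l ≤ l') (hr : r' ≤ r) :
    DD P l' r' := fun i j hi hij hj => h i j (by omega) hij (by omega)

-- number of valid r-ends for a given start s  /  valid l-starts for a given end r
noncomputable def cntR (P : List Int) (N s : Int) : ℤ := (((Finset.Ioc s N).filter fun r => Db P s r).card : ℤ)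
noncomputable def cntL (P : List Int) (r : Int) : ℤ := (((Finset.Ico 0 r).filter fun l => Db P l r).card : ℤ)

lemma sum_swap_key (P : List Int) (N : Int) :
    ∑ s ∈ Finset.Ico (0 : ℤ) N, cntR P N s = ∑ r ∈ Finset.Ioc (0 : ℤ) N, cntL P r := by
  have h1 : ∀ s ∈ Finset.Ico (0 : ℤ) N,
      cntR P N s = ∑ r ∈ Finset.Ioc (0 : ℤ) N, (if s < r ∧ Db P s r then (1 : ℤ) else 0) := by
    intro s hs
    simp only [Finset.mem_Ico] at hs
    unfold cntR
    have he : (Finset.Ioc s N).filter (fun r => Db P s r)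
        = (Finset.Ioc (0 : ℤ) N).filter (fun r => s < r ∧ Db P s r) := by
      ext r
      simp only [Finset.mem_filter, Finset.mem_Ioc]
      constructor
      · rintro ⟨⟨ha, hb⟩, hc⟩
        exact ⟨⟨by omega, hb⟩, ha, hc⟩
      · rintro ⟨⟨_, hb⟩, hc, hd⟩
        exact ⟨⟨hc, hb⟩, hd⟩
    rw [he, Finset.card_filter]
    push_cast
    rfl
  have h2 : ∀ r ∈ Finset.Ioc (0 : ℤ) N,
      cntL P r = ∑ s ∈ Finset.Ico (0 : ℤ) N, (if s < r ∧ Db P s r then (1 : ℤ) else 0) := by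
    intro r hr
    simp only [Finset.mem_Ioc] at hr
    unfold cntL
    have he : (Finset.Ico (0 : ℤ) r).filter (fun s => Db P s r)
        = (Finset.Ico (0 : ℤ) N).filter (fun s => s < r ∧ Db P s r) := by
      ext s
      simp only [Finset.mem_filter, Finset.mem_Ico]
      constructor
      · rintro ⟨⟨ha, hb⟩, hc⟩
        exact ⟨⟨ha, by omega⟩, hb, hc⟩
      · rintro ⟨⟨ha, _⟩, hc, hd⟩
        exact ⟨⟨ha, hc⟩, hd⟩
    rw [he, Finset.card_filter]
    push_cast
    rfl
  rw [Finset.sum_congr rfl h1, Finset.sum_congr rfl h2]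
  exact Finset.sum_comm

-- ===== A-side =====

lemma innerA_spec (N : Int) (P : List Int) (s e : Int) (S : PySem.Set Int)
    (hs : 0 ≤ s) (hsN : s ≤ N) (hse : s - 1 ≤ e) (heN : e ≤ N) (hD : DD P s e)
    (hS : ∀ x, x ∈ S ↔ ∃ i, s ≤ i ∧ i ≤ e ∧ gP P i = x) :
    ∃ e' S', solveInner N P e S = (e', S') ∧ s ≤ e' ∧ e ≤ e' ∧ e' ≤ N ∧ DD P s e' ∧
      (e' = N ∨ ¬ DD P s (e' + 1)) ∧
      (∀ x, x ∈ S' ↔ ∃ i, s ≤ i ∧ i ≤ e' ∧ gP P i = x) := by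
  induction hn : (N - e).toNat using Nat.strong_induction_on generalizing e S with
  | _ n ih =>
    rw [solveInner]
    split
    case isTrue hcond =>
      obtain ⟨heN', hnot⟩ := hcond
      have hgnot : PySem.List.pyGetD P (e + 1) 0 ∉ S := by
        intro hmem
        exact hnot ((PySem.Set.contains_iff S _).mpr hmem)
      have hD' : DD P s (e + 1) := by
        intro i j hi hij hj
        by_cases hje : j ≤ e
        · exact hD i j hi hij hje
        · have hj1 : j = e + 1 := by omega
          subst hj1
          intro heq
          exact hgnot ((hS _).mpr ⟨i, hi, by omega, heq⟩)
      have hS' : ∀ x, x ∈ PySem.Set.add S (PySem.List.pyGetD P (e + 1) 0) ↔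
          ∃ i, s ≤ i ∧ i ≤ e + 1 ∧ gP P i = x := by
        intro x
        rw [PySem.Set.mem_add]
        constructor
        · rintro (hx | hx)
          · obtain ⟨i, h1, h2, h3⟩ := (hS x).mp hx
            exact ⟨i, h1, by omega, h3⟩
          · exact ⟨e + 1, by omega, le_rfl, hx.symm⟩
        · rintro ⟨i, h1, h2, h3⟩
          by_cases hie : i ≤ e
          · exact Or.inl ((hS x).mpr ⟨i, h1, hie, h3⟩)
          · have : i = e + 1 := by omega
            subst this
            exact Or.inr h3.symm
      obtain ⟨e', S', heq, k1, k2, k3, k4, k5, k6⟩ :=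
        ih ((N - (e + 1)).toNat) (by omega) (e + 1)
          (PySem.Set.add S (PySem.List.pyGetD P (e + 1) 0)) (by omega) (by omega) hD' hS' rfl
      exact ⟨e', S', heq, k1, by omega, k3, k4, k5, k6⟩
    case isFalse hcond =>
      push Not at hcond
      have hes : s ≤ e := by
        by_contra hlt
        have he1 : e = s - 1 := by omega
        have hlt' : e < N := by omega
        have hcont := hcond hlt'
        rw [PySem.Set.contains_iff] at hcont
        obtain ⟨i, h1, h2, _⟩ := (hS _).mp hcont
        omega
      refine ⟨e, S, rfl, hes, le_rfl, heN, hD, ?_, hS⟩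
      by_cases heN2 : e < N
      · right
        have hcont := hcond heN2
        rw [PySem.Set.contains_iff] at hcont
        obtain ⟨i, h1, h2, h3⟩ := (hS _).mp hcont
        intro hDD
        exact hDD i (e + 1) h1 (by omega) le_rfl h3
      · left; omega

lemma cntR_of_end (P : List Int) (N s e : Int) (hs : s ≤ e) (heN : e ≤ N)
    (hD : DD P s e) (hmax : e = N ∨ ¬ DD P s (e + 1)) :
    cntR P N s = e - s := by
  unfold cntR
  have hfe : (Finset.Ioc s N).filter (fun r => Db P s r) = Finset.Ioc s e := by
    ext r
    simp only [Finset.mem_filter, Finset.mem_Ioc, Db_iff]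
    constructor
    · rintro ⟨⟨hsr, hrN⟩, hDr⟩
      refine ⟨hsr, ?_⟩
      by_contra hre
      push Not at hre
      rcases hmax with hmax | hmax
      · omega
      · exact hmax (DD_mono P hDr le_rfl (by omega))
    · rintro ⟨hsr, hre⟩
      exact ⟨⟨hsr, by omega⟩, DD_mono P hD le_rfl hre⟩
  rw [hfe, Int.card_Ioc]
  omega

lemma outerA_spec (N : Int) (P : List Int) (s e ans : Int) (S : PySem.Set Int)
    (hs : 0 ≤ s) (hse : s - 1 ≤ e) (heN : e ≤ N) (hD : DD P s e)
    (hS : ∀ x, x ∈ S ↔ ∃ i, s ≤ i ∧ i ≤ e ∧ gP P i = x) :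
    solveOuter N P s e ans S = ans + ∑ s' ∈ Finset.Ico s N, cntR P N s' := by
  induction hn : (N - s).toNat using Nat.strong_induction_on generalizing s e ans S with
  | _ n ih =>
    rw [solveOuter]
    split
    case isTrue hsN =>
      obtain ⟨e', S', heq, k1, k2, k3, k4, k5, k6⟩ :=
        innerA_spec N P s e S hs (by omega) hse heN hD hS
      rw [heq]
      have hD1 : DD P (s + 1) e' := DD_mono P k4 (by omega) le_rfl
      have hS1 : ∀ x, x ∈ PySem.Set.discard S' (PySem.List.pyGetD P s 0) ↔
          ∃ i, s + 1 ≤ i ∧ i ≤ e' ∧ gP P i = x := by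
        intro x
        rw [PySem.Set.mem_discard]
        constructor
        · rintro ⟨hx, hne⟩
          obtain ⟨i, h1, h2, h3⟩ := (k6 x).mp hx
          rcases eq_or_lt_of_le h1 with h | h
          · exact absurd (h ▸ h3) (fun hh => hne hh.symm)
          · exact ⟨i, by omega, h2, h3⟩
        · rintro ⟨i, h1, h2, h3⟩
          refine ⟨(k6 x).mpr ⟨i, by omega, h2, h3⟩, ?_⟩
          intro hxg
          exact k4 s i le_rfl (by omega) h2 (h3.trans hxg).symm
      have hrec := ih ((N - (s + 1)).toNat) (by omega) (s + 1) e'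
        (ans + (e' - s)) (PySem.Set.discard S' (PySem.List.pyGetD P s 0))
        (by omega) (by omega) k3 hD1 hS1 rfl
      rw [hrec]
      have hsplit : Finset.Ico s N = insert s (Finset.Ico (s + 1) N) := by
        ext x
        simp only [Finset.mem_Ico, Finset.mem_insert]
        omega
      rw [hsplit, Finset.sum_insert (by simp only [Finset.mem_Ico]; omega),
        cntR_of_end P N s e' k1 k3 k4 k5]
      ring
    case isFalse hsN =>
      rw [Finset.Ico_eq_empty (by omega), Finset.sum_empty, add_zero]

-- ===== B-side =====

def InvB (P : List Int) (r : Int) (st : PySem.Dict Int Int × Int × Int) : Prop :=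
  (∀ v j, st.1.get? v = some j ↔
      (0 ≤ j ∧ j ≤ r ∧ gP P j = v ∧ ∀ k, j < k → k ≤ r → gP P k ≠ v)) ∧
  0 ≤ st.2.1 ∧ st.2.1 ≤ r ∧ DD P st.2.1 r ∧ (st.2.1 = 0 ∨ ¬ DD P (st.2.1 - 1) r) ∧
  st.2.2 = ∑ r' ∈ Finset.Ioc (0 : ℤ) r, cntL P r'

lemma cntL_of_left (P : List Int) (r l : Int) (h0 : 0 ≤ l) (hlr : l ≤ r)
    (hD : DD P l r) (hmin : l = 0 ∨ ¬ DD P (l - 1) r) :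
    cntL P r = r - l := by
  unfold cntL
  have hfe : (Finset.Ico (0 : ℤ) r).filter (fun l' => Db P l' r) = Finset.Ico l r := by
    ext s
    simp only [Finset.mem_filter, Finset.mem_Ico, Db_iff]
    constructor
    · rintro ⟨⟨hs0, hsr⟩, hDs⟩
      refine ⟨?_, hsr⟩
      by_contra hsl
      push Not at hsl
      rcases hmin with hmin | hmin
      · omega
      · exact hmin (DD_mono P hDs (by omega) le_rfl)
    · rintro ⟨hls, hsr⟩
      exact ⟨⟨by omega, hsr⟩, DD_mono P hD hls le_rfl⟩
  rw [hfe, Int.card_Ico]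
  omega

lemma lastOcc (P : List Int) (r v k : Int) (h0 : 0 ≤ k) (hk : k ≤ r) (hv : gP P k = v) :
    ∃ j, 0 ≤ j ∧ j ≤ r ∧ gP P j = v ∧ ∀ k', j < k' → k' ≤ r → gP P k' ≠ v := by
  have hne : ((Finset.Icc (0 : ℤ) r).filter fun x => gP P x = v).Nonempty := by
    refine ⟨k, ?_⟩
    simp only [Finset.mem_filter, Finset.mem_Icc]
    exact ⟨⟨h0, hk⟩, hv⟩
  obtain ⟨j, hjT, hjmax⟩ :=
    Finset.exists_max_image ((Finset.Icc (0 : ℤ) r).filter fun x => gP P x = v) id hne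
  simp only [Finset.mem_filter, Finset.mem_Icc] at hjT
  refine ⟨j, hjT.1.1, hjT.1.2, hjT.2, ?_⟩
  intro k' hk1 hk2 hk3
  have hmem : k' ∈ (Finset.Icc (0 : ℤ) r).filter fun x => gP P x = v := by
    simp only [Finset.mem_filter, Finset.mem_Icc]
    exact ⟨⟨by omega, hk2⟩, hk3⟩
  have := hjmax k' hmem
  simp only [id] at this
  omega

lemma altStep_spec (P : List Int) (r : Int) (st : PySem.Dict Int Int × Int × Int)
    (hr : 1 ≤ r) (h : InvB P (r - 1) st) : InvB P r (altStep P st r) := by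
  obtain ⟨pos, left, ans⟩ := st
  obtain ⟨hpos, hl0, hlr, hD, hmin, hans⟩ := h
  dsimp only at hpos hl0 hlr hD hmin hans
  have hgr : PySem.List.pyGetD P r 0 = gP P r := rfl
  -- the new dict characterization (independent of the branch)
  have hdict : ∀ v j, (pos.insert (gP P r) r).get? v = some j ↔
      (0 ≤ j ∧ j ≤ r ∧ gP P j = v ∧ ∀ k, j < k → k ≤ r → gP P k ≠ v) := by
    intro v j
    rw [PySem.Dict.get?_insert]
    by_cases hveq : v = gP P r
    · subst hveq
      rw [if_pos rfl]
      constructor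
      · intro hj
        have hj' : j = r := by injection hj with hj'; omega
        subst hj'
        exact ⟨by omega, le_rfl, rfl, fun k hk1 hk2 _ => by omega⟩
      · rintro ⟨h0, h1, h2, h3⟩
        have hjr : j = r := by
          by_contra hne
          exact h3 r (by omega) le_rfl rfl
        rw [hjr]
    · rw [if_neg hveq, hpos v j]
      constructor
      · rintro ⟨h0, h1, h2, h3⟩
        refine ⟨h0, by omega, h2, ?_⟩
        intro k hk1 hk2
        by_cases hkr : k ≤ r - 1
        · exact h3 k hk1 hkr
        · have : k = r := by omega
          subst this
          exact fun he => hveq he.symm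
      · rintro ⟨h0, h1, h2, h3⟩
        have hjr : j ≠ r := by
          intro hjr
          subst hjr
          exact hveq h2.symm
        exact ⟨h0, by omega, h2, fun k hk1 hk2 => h3 k hk1 (by omega)⟩
  have hsplit : Finset.Ioc (0 : ℤ) r = insert r (Finset.Ioc (0 : ℤ) (r - 1)) := by
    ext x
    simp only [Finset.mem_Ioc, Finset.mem_insert]
    omega
  have hnotmem : r ∉ Finset.Ioc (0 : ℤ) (r - 1) := by
    simp only [Finset.mem_Ioc]
    omega
  rcases hget : pos.get? (gP P r) with _ | j
  · -- no previous occurrence of presum[r]: left is unchanged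
    have hstep : altStep P (pos, left, ans) r
        = (pos.insert (gP P r) r, left, ans + (r - left)) := by
      simp only [altStep, hgr, hget]
    have hD' : DD P left r := by
      intro a b ha hab hbr
      by_cases hb : b ≤ r - 1
      · exact hD a b ha hab hb
      · have hbe : b = r := by omega
        intro heq
        rw [hbe] at heq
        obtain ⟨j0, p0, p1, p2, p3⟩ := lastOcc P (r - 1) (gP P r) a (by omega) (by omega) heq
        rw [(hpos (gP P r) j0).mpr ⟨p0, p1, p2, p3⟩] at hget
        cases hget
    have hmin' : left = 0 ∨ ¬ DD P (left - 1) r := by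
      rcases hmin with hm | hm
      · exact Or.inl hm
      · exact Or.inr fun hDD => hm (DD_mono P hDD le_rfl (by omega))
    rw [hstep]
    unfold InvB
    dsimp only
    refine ⟨hdict, hl0, by omega, hD', hmin', ?_⟩
    rw [hans, hsplit, Finset.sum_insert hnotmem, cntL_of_left P r left hl0 (by omega) hD' hmin']
    ring
  · obtain ⟨hj0, hjr1, hjv, hjlast⟩ := (hpos (gP P r) j).mp hget
    by_cases hjl : j ≥ left
    · -- previous occurrence inside the window: left jumps to j + 1
      have hstep : altStep P (pos, left, ans) r
          = (pos.insert (gP P r) r, j + 1, ans + (r - (j + 1))) := by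
        simp only [altStep, hgr, hget]
        rw [if_pos hjl]
      have hD' : DD P (j + 1) r := by
        intro a b ha hab hbr
        by_cases hb : b ≤ r - 1
        · exact hD a b (by omega) hab hb
        · have hbe : b = r := by omega
          intro heq
          rw [hbe] at heq
          exact hjlast a (by omega) (by omega) heq
      have hmin' : j + 1 = 0 ∨ ¬ DD P (j + 1 - 1) r := by
        refine Or.inr fun hDD => ?_
        exact hDD j r (by omega) (by omega) le_rfl hjv
      rw [hstep]
      unfold InvB
      dsimp only
      refine ⟨hdict, by omega, by omega, hD', hmin', ?_⟩
      rw [hans, hsplit, Finset.sum_insert hnotmem,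
        cntL_of_left P r (j + 1) (by omega) (by omega) hD' hmin']
      ring
    · -- stale occurrence, before the window: left is unchanged
      have hstep : altStep P (pos, left, ans) r
          = (pos.insert (gP P r) r, left, ans + (r - left)) := by
        simp only [altStep, hgr, hget]
        rw [if_neg hjl]
      have hD' : DD P left r := by
        intro a b ha hab hbr
        by_cases hb : b ≤ r - 1
        · exact hD a b ha hab hb
        · have hbe : b = r := by omega
          intro heq
          rw [hbe] at heq
          exact hjlast a (by omega) (by omega) heq
      have hmin' : left = 0 ∨ ¬ DD P (left - 1) r := by
        rcases hmin with hm | hm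
        · exact Or.inl hm
        · exact Or.inr fun hDD => hm (DD_mono P hDD le_rfl (by omega))
      rw [hstep]
      unfold InvB
      dsimp only
      refine ⟨hdict, hl0, by omega, hD', hmin', ?_⟩
      rw [hans, hsplit, Finset.sum_insert hnotmem, cntL_of_left P r left hl0 (by omega) hD' hmin']
      ring

lemma foldB_spec (P : List Int) (hP0 : gP P 0 = 0) (m : ℕ) :
    InvB P m ((PySem.List.pyRange 1 ((m : Int) + 1) 1).foldl (altStep P)
      ((PySem.Dict.empty.insert 0 0 : PySem.Dict Int Int), 0, 0)) := by
  induction m with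
  | zero =>
    rw [Nat.cast_zero, zero_add, PySem.List.pyRange_one_eq_nil (by omega), List.foldl_nil]
    unfold InvB
    dsimp only
    refine ⟨?_, le_rfl, le_rfl, ?_, Or.inl rfl, ?_⟩
    · intro v j
      rw [PySem.Dict.get?_insert, PySem.Dict.get?_empty]
      by_cases hv : v = 0
      · subst hv
        rw [if_pos rfl]
        constructor
        · intro h
          have hj : j = 0 := by injection h with h'; omega
          subst hj
          exact ⟨le_rfl, le_rfl, hP0, fun k hk1 hk2 => absurd hk1 (by omega)⟩
        · rintro ⟨h0, h1, _, _⟩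
          have : j = 0 := by omega
          rw [this]
      · rw [if_neg hv]
        constructor
        · intro h
          cases h
        · rintro ⟨h0, h1, h2, _⟩
          have : j = 0 := by omega
          subst this
          exact ((hv (h2.symm.trans hP0)).elim)
    · exact fun i j hi hij hj => False.elim (by omega)
    · rw [Finset.Ioc_self, Finset.sum_empty]
  | succ k ih =>
    have hcast : (((k + 1 : ℕ) : ℤ) + 1) = ((k : ℤ) + 1) + 1 := by push_cast; ring
    rw [hcast, PySem.List.pyRange_one_succ_right (by omega), List.foldl_append,
      List.foldl_cons, List.foldl_nil]
    have hres := altStep_spec P ((k : ℤ) + 1) _ (by omega)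
      (by rw [show ((k : ℤ) + 1) - 1 = (k : ℤ) by ring]; exact ih)
    rw [show (((k + 1 : ℕ) : ℤ)) = (k : ℤ) + 1 by push_cast; ring]
    exact hres

-- presum starts with its initial 0
lemma presum_head (A : List Int) :
    gP (A.foldl (fun ps v => ps ++ [PySem.List.pyGetD ps (-1) 0 + v]) [0]) 0 = 0 := by
  have key : ∀ (l : List Int) (init : List Int),
      ∃ t, l.foldl (fun ps v => ps ++ [PySem.List.pyGetD ps (-1) 0 + v]) init = init ++ t := by
    intro l
    induction l with
    | nil => exact fun init => ⟨[], by simp⟩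
    | cons x xs ih =>
      intro init
      obtain ⟨t, ht⟩ := ih (init ++ [PySem.List.pyGetD init (-1) 0 + x])
      exact ⟨[PySem.List.pyGetD init (-1) 0 + x] ++ t, by simp [List.foldl_cons, ht]⟩
  obtain ⟨t, ht⟩ := key A [0]
  rw [ht]
  simp [gP, PySem.List.pyGetD_zero_cons]

lemma main_eq (N : Int) (A : List Int) : solve N A = solve_alt N A := by
  have e1 : solve N A = solveOuter N
      (A.foldl (fun ps v => ps ++ [PySem.List.pyGetD ps (-1) 0 + v]) [0]) 0 0 0
      (PySem.Set.ofList [0]) := rfl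
  have e2 : solve_alt N A = ((PySem.List.pyRange 1 (N + 1) 1).foldl
      (altStep (A.foldl (fun ps v => ps ++ [PySem.List.pyGetD ps (-1) 0 + v]) [0]))
      ((PySem.Dict.empty.insert 0 0 : PySem.Dict Int Int), 0, 0)).2.2 := rfl
  set P := A.foldl (fun ps v => ps ++ [PySem.List.pyGetD ps (-1) 0 + v]) [0] with hP
  rw [e1, e2]
  by_cases hN : N ≤ 0
  · rw [solveOuter, dif_neg (by omega : ¬ ((0 : ℤ) < N)),
      PySem.List.pyRange_one_eq_nil (by omega), List.foldl_nil]
  · have hP0 : gP P 0 = 0 := presum_head A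
    have hA := outerA_spec N P 0 0 0 (PySem.Set.ofList [0]) le_rfl (by omega) (by omega)
      (fun i j hi hij hj => False.elim (by omega)) ?_
    · have hB := foldB_spec P hP0 N.toNat
      rw [show ((N.toNat : ℕ) : ℤ) = N by omega] at hB
      obtain ⟨_, _, _, _, _, hans⟩ := hB
      rw [hA, hans, zero_add]
      exact sum_swap_key P N
    · intro x
      rw [PySem.Set.mem_ofList, List.mem_singleton]
      constructor
      · intro hx
        exact ⟨0, le_rfl, le_rfl, hP0.trans hx.symm⟩
      · rintro ⟨i, h1, h2, h3⟩
        have : i = 0 := by omega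
        subst this
        exact h3.symm.trans hP0

-- ===== VERDICT (by name: the statement is the Claim_ definition above) =====
theorem solve_spec : Claim_equal_solve := by
  intro N A _ _
  unfold Spec_solve
  exact main_eq N A
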